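-- pv_equiv track=rewrite | github.com/alipay/Antchain-MPC | morse-stf/stensorflow/basic/protocol/msb.py | reduce_special_mul
-- ===== SOURCE A (Python) =====
-- def special_mul(x, y):
--     """
--     :param x: =(x0, x1)
--     :param y: =(y0, y1)
--     :return: (x0y0, x1y2+x2)
--     """
--     return x[0] * y[0], x[0] * y[1] + x[1]
--
-- def reduce_special_mul(list_mat):
--     """
--
--     :param list_mat:
--     :return:
--     """
--     lengh = len(list_mat)
--     if lengh == 1:
--         return list_mat[0]
--     else:
--         list0 = list_mat[0: lengh // 2]
--         list1 = list_mat[lengh // 2: lengh]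
--         r0 = reduce_special_mul(list0)
--         r1 = reduce_special_mul(list1)
--         return special_mul(r0, r1)
-- ===== SOURCE B (Python) =====
-- def special_mul(x, y):
--     return x[0] * y[0], x[0] * y[1] + x[1]
--
-- def reduce_special_mul(list_mat):
--     # left fold: special_mul is associative over exact (int) arithmetic,
--     # so a single left-to-right pass gives the same result as the half-split tree
--     it = iter(list_mat)
--     acc = next(it)
--     for y in it:
--         acc = (acc[0] * y[0], acc[0] * y[1] + acc[1])
--     return acc
-- ===== Notes on version B (the rewrite author's own statement) =====
-- stated objective: simpler
-- what changed: Replaces the recursive balanced half-split tree reduction by a single left-to-right fold with an accumulator, justified by associativity of special_mul over integers.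
import Mathlib
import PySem

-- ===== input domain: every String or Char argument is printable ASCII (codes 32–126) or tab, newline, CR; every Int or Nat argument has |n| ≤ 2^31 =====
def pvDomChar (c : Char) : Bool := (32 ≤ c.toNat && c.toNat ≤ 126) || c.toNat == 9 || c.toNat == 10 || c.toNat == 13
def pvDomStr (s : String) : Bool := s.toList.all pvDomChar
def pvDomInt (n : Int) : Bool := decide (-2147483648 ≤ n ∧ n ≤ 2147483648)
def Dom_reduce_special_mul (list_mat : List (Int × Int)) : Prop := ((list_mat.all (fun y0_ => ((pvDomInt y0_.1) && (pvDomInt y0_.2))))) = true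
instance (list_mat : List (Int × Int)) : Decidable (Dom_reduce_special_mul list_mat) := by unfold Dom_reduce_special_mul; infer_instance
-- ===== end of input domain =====

-- B replaces A's recursive balanced half-split tree by a single left fold (special_mul is
-- associative over exact integer arithmetic); return values only, no mutation involved.

-- ===== PORT A =====
def special_mul (x y : Int × Int) : Int × Int := (x.1 * y.1, x.1 * y.2 + x.2)

-- slice lengths for the termination proof of the recursion below
theorem pv_slice_left_lt (l : List (Int × Int)) (h : 2 ≤ l.length) :
    (PySem.List.slice l (some 0) (some (PySem.Int.floordiv (l.length : Int) 2))).length < l.length := by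
  have hm : PySem.Int.floordiv (l.length : Int) 2 = ((l.length / 2 : Nat) : Int) :=
    PySem.Int.floordiv_natCast l.length 2
  rw [hm]
  simp only [PySem.List.slice_zero_start, PySem.List.slice_to_natCast, List.length_take]
  omega

theorem pv_slice_right_lt (l : List (Int × Int)) (h : 2 ≤ l.length) :
    (PySem.List.slice l (some (PySem.Int.floordiv (l.length : Int) 2)) (some (l.length : Int))).length < l.length := by
  have hm : PySem.Int.floordiv (l.length : Int) 2 = ((l.length / 2 : Nat) : Int) :=
    PySem.Int.floordiv_natCast l.length 2
  rw [hm, PySem.List.slice_natCast]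
  simp only [List.length_take, List.length_drop]
  omega

def reduce_special_mul (list_mat : List (Int × Int)) : Int × Int :=
  if _h1 : list_mat.length = 1 then (PySem.List.pyGet? list_mat 0).getD (1, 0)
  else if _h0 : list_mat.length = 0 then (1, 0)  -- Python recurses forever on []; excluded by Pre_
  else
    let mid : Int := PySem.Int.floordiv (list_mat.length : Int) 2
    let list0 := PySem.List.slice list_mat (some 0) (some mid)
    let list1 := PySem.List.slice list_mat (some mid) (some (list_mat.length : Int))
    special_mul (reduce_special_mul list0) (reduce_special_mul list1)
termination_by list_mat.length
decreasing_by
  · exact pv_slice_left_lt list_mat (by omega)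
  · exact pv_slice_right_lt list_mat (by omega)

-- ===== PORT B =====
def reduce_special_mul_alt (list_mat : List (Int × Int)) : Int × Int :=
  match list_mat with
  | [] => (1, 0)  -- Source B raises StopIteration here; excluded by Pre_
  | x :: xs => xs.foldl special_mul x

-- ===== PRECONDITION & SPEC =====
-- Pre_ excludes the empty list, on which A recurses forever (RecursionError) and B raises StopIteration.
def Pre_reduce_special_mul (list_mat : List (Int × Int)) : Prop := list_mat ≠ []
instance (list_mat : List (Int × Int)) : Decidable (Pre_reduce_special_mul list_mat) := by
  unfold Pre_reduce_special_mul; infer_instance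
def pvWitness_reduce_special_mul : (List (Int × Int)) := [(2, 3), (5, 7)]

def Spec_reduce_special_mul (list_mat : List (Int × Int)) (out : Int × Int) : Prop := out = reduce_special_mul_alt list_mat
instance (list_mat : List (Int × Int)) (out : Int × Int) : Decidable (Spec_reduce_special_mul list_mat out) := by unfold Spec_reduce_special_mul; infer_instance

-- ===== CLAIM (what is proved, stated in full; the proofs are below) =====
def Claim_equal_reduce_special_mul : Prop := ∀ (list_mat : List (Int × Int)), Dom_reduce_special_mul list_mat → Pre_reduce_special_mul list_mat → Spec_reduce_special_mul list_mat (reduce_special_mul list_mat)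

-- ===== LEMMAS AND PROOFS =====
theorem special_mul_assoc (x y z : Int × Int) :
    special_mul (special_mul x y) z = special_mul x (special_mul y z) := by
  simp [special_mul]; ring_nf; simp

theorem foldl_special_mul_assoc (l : List (Int × Int)) (a b : Int × Int) :
    l.foldl special_mul (special_mul a b) = special_mul a (l.foldl special_mul b) := by
  induction l generalizing b with
  | nil => rfl
  | cons c l ih => simp only [List.foldl_cons, special_mul_assoc, ih]

theorem alt_append (l1 l2 : List (Int × Int)) (h1 : l1 ≠ []) (h2 : l2 ≠ []) :
    reduce_special_mul_alt (l1 ++ l2) =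
      special_mul (reduce_special_mul_alt l1) (reduce_special_mul_alt l2) := by
  obtain ⟨x, xs, rfl⟩ := List.exists_cons_of_ne_nil h1
  obtain ⟨y, ys, rfl⟩ := List.exists_cons_of_ne_nil h2
  simp only [reduce_special_mul_alt, List.cons_append, List.foldl_append, List.foldl_cons]
  rw [foldl_special_mul_assoc]

theorem reduce_eq_alt (l : List (Int × Int)) (h : l ≠ []) :
    reduce_special_mul l = reduce_special_mul_alt l := by
  induction hn : l.length using Nat.strong_induction_on generalizing l with
  | _ n ih =>
  rw [reduce_special_mul]
  by_cases h1 : l.length = 1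
  · obtain ⟨x, xs, rfl⟩ := List.exists_cons_of_ne_nil h
    have : xs = [] := by simpa using h1
    subst this
    simp [h1, PySem.List.pyGet?, PySem.List.pyIdx?, reduce_special_mul_alt]
  · have h0 : l.length ≠ 0 := by simpa using h
    have hlen : 2 ≤ l.length := by omega
    simp only [h1, h0, dif_neg, not_false_iff]
    have hm : PySem.Int.floordiv (l.length : Int) 2 = ((l.length / 2 : Nat) : Int) :=
      PySem.Int.floordiv_natCast l.length 2
    have hl0 : PySem.List.slice l (some 0) (some (PySem.Int.floordiv (l.length : Int) 2))
        = l.take (l.length / 2) := by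
      rw [hm]
      simp only [PySem.List.slice_zero_start, PySem.List.slice_to_natCast]
    have hl1 : PySem.List.slice l (some (PySem.Int.floordiv (l.length : Int) 2)) (some (l.length : Int))
        = l.drop (l.length / 2) := by
      rw [hm, PySem.List.slice_natCast]
      apply List.take_of_length_le
      simp
    rw [hl0, hl1]
    have hne0 : l.take (l.length / 2) ≠ [] := by
      simp only [ne_eq, ← List.length_eq_zero_iff, List.length_take]; omega
    have hne1 : l.drop (l.length / 2) ≠ [] := by
      simp only [ne_eq, ← List.length_eq_zero_iff, List.length_drop]; omega
    rw [ih _ (by subst hn; simp [List.length_take]; omega) _ hne0 rfl,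
        ih _ (by subst hn; simp; omega) _ hne1 rfl,
        ← alt_append _ _ hne0 hne1, List.take_append_drop]

-- ===== VERDICT (by name: the statement is the Claim_ definition above) =====
theorem reduce_special_mul_spec : Claim_equal_reduce_special_mul := by
  intro l _ hpre
  exact reduce_eq_alt l hpre
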